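-- pv_equiv track=rewrite | github.com/k-i-b-i-wott/Code-Sprints | problems/intermediate/ema_supercomputer/ema_supercomputer.py | is_valid_plus
-- ===== SOURCE A (Python) =====
-- def is_valid_plus(grid, center_row, center_col, length):
--     rows = len(grid)
--     cols = len(grid[0])
--
--     # Check if we can extend arms in all 4 directions
--     for i in range(length):
--         # Check up
--         if center_row - i < 0 or grid[center_row - i][center_col] != 'G':
--             return False
--         # Check down
--         if center_row + i >= rows or grid[center_row + i][center_col] != 'G':
--             return False
--         # Check left
--         if center_col - i < 0 or grid[center_row][center_col - i] != 'G':
--             return False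
--         # Check right
--         if center_col + i >= cols or grid[center_row][center_col + i] != 'G':
--             return False
--     return True
-- ===== SOURCE B (Python) =====
-- def is_valid_plus(grid, center_row, center_col, length):
--     rows = len(grid)
--     cols = len(grid[0])
--     if length <= 0:
--         return True
--
--     def extent(dr, dc):
--         # maximal number of consecutive in-bounds 'G' cells starting at the
--         # center and walking in direction (dr, dc)
--         n = 0
--         r, c = center_row, center_col
--         while 0 <= r < rows and 0 <= c < cols and grid[r][c] == 'G':
--             n += 1
--             r += dr
--             c += dc
--         return n
--
--     # the plus is valid iff every one of the four maximal arms reaches `length`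
--     return min(extent(-1, 0), extent(1, 0), extent(0, -1), extent(0, 1)) >= length
-- ===== Notes on version B (the rewrite author's own statement) =====
-- stated objective: alternative
-- what changed: B computes the maximal run of in-bounds 'G' cells from the center in each of the four directions with a directional walk and returns min(extents) >= length, instead of A's single loop that validates bounds and cell values offset by offset in all four directions at once.
import Mathlib
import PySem

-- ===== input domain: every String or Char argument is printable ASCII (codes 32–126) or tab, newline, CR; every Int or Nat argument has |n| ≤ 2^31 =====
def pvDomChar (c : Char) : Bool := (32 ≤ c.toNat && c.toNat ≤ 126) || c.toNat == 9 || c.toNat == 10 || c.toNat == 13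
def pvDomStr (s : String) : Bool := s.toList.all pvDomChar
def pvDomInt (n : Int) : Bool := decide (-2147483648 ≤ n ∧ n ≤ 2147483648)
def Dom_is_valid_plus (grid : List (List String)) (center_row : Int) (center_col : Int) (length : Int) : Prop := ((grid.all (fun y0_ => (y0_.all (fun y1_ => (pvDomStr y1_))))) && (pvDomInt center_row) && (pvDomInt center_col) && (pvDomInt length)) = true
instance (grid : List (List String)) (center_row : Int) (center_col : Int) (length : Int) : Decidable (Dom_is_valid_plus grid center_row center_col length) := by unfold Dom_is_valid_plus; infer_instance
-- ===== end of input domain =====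

-- B replaces A's per-offset validation loop by measuring the maximal 'G' run from the
-- center in each of the four directions and comparing the minimum with length
-- (objective: alternative); return value only, no side effects involved.

-- ===== PORT A =====
-- grid[r][c] == 'G' (false also where Python would raise; Pre_ excludes all raising inputs)
def pvCellA (grid : List (List String)) (r c : Int) : Bool :=
  match PySem.List.pyGet? grid r with
  | none => false
  | some row =>
    match PySem.List.pyGet? row c with
    | none => false
    | some s => s == "G"

-- A's for-loop over range(length): fuel = remaining iterations, i = current index
def pvLoopA (grid : List (List String)) (cr cc rows cols : Int) : Nat → Int → Bool
  | 0, _ => true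
  | n+1, i =>
    if cr - i < 0 || !pvCellA grid (cr - i) cc then false
    else if cr + i ≥ rows || !pvCellA grid (cr + i) cc then false
    else if cc - i < 0 || !pvCellA grid cr (cc - i) then false
    else if cc + i ≥ cols || !pvCellA grid cr (cc + i) then false
    else pvLoopA grid cr cc rows cols n (i + 1)

def is_valid_plus (grid : List (List String)) (center_row : Int) (center_col : Int) (length : Int) : Bool :=
  let rows : Int := grid.length
  match PySem.List.pyGet? grid 0 with
  | none => false   -- Python raises IndexError on the empty grid; excluded by Pre_
  | some row0 =>
    let cols : Int := row0.length
    pvLoopA grid center_row center_col rows cols length.toNat 0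

-- ===== PORT B =====
-- grid[r][c] == 'G' as an Option comparison (only reached on in-range indices)
def pvCellB (grid : List (List String)) (r c : Int) : Bool :=
  ((PySem.List.pyGet? grid r).bind (fun row => PySem.List.pyGet? row c)) == some "G"

-- the while-loop guard of B's extent walk
def pvGood (grid : List (List String)) (rows cols r c : Int) : Bool :=
  decide (0 ≤ r) && decide (r < rows) && decide (0 ≤ c) && decide (c < cols) &&
  pvCellB grid r c

-- B's extent(dr, dc) walk; the fuel is only a totality guard: the Python loop stays
-- in bounds and moves one step per iteration, so it exits within rows + cols steps
def pvExtent (grid : List (List String)) (rows cols dr dc : Int) : Nat → Int → Int → Nat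
  | 0, _, _ => 0
  | f+1, r, c =>
    if pvGood grid rows cols r c then pvExtent grid rows cols dr dc f (r + dr) (c + dc) + 1
    else 0

def is_valid_plus_alt (grid : List (List String)) (center_row : Int) (center_col : Int) (length : Int) : Bool :=
  let rows : Int := grid.length
  match PySem.List.pyGet? grid 0 with
  | none => false   -- Python raises IndexError on the empty grid; excluded by Pre_
  | some row0 =>
    let cols : Int := row0.length
    if length ≤ 0 then true
    else
      let fuel := (rows + cols).toNat + 1
      let e1 : Int := pvExtent grid rows cols (-1) 0 fuel center_row center_col
      let e2 : Int := pvExtent grid rows cols 1 0 fuel center_row center_col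
      let e3 : Int := pvExtent grid rows cols 0 (-1) fuel center_row center_col
      let e4 : Int := pvExtent grid rows cols 0 1 fuel center_row center_col
      decide (length ≤ min (min e1 e2) (min e3 e4))

-- ===== PRECONDITION & SPEC =====
-- Pre_ excludes the empty grid (grid[0] raises IndexError) and, when the scan runs
-- (length > 0, center_row ≥ 0), grids that are not rectangular or centers whose start cell
-- lies outside the first row's bounds: there A raises IndexError, or — on ragged grids —
-- whether A raises depends on the cell values, which no closed-form input condition captures.
def Pre_is_valid_plus (grid : List (List String)) (center_row : Int) (center_col : Int) (length : Int) : Prop :=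
  grid ≠ [] ∧
  (length ≤ 0 ∨ center_row < 0 ∨
    ((∀ row ∈ grid, row.length = grid.headI.length) ∧
     center_row < (grid.length : Int) ∧
     -(grid.headI.length : Int) ≤ center_col ∧ center_col < (grid.headI.length : Int)))
instance (grid : List (List String)) (center_row : Int) (center_col : Int) (length : Int) : Decidable (Pre_is_valid_plus grid center_row center_col length) := by unfold Pre_is_valid_plus; infer_instance

def pvWitness_is_valid_plus : List (List String) × Int × Int × Int := ([["G"]], 0, 0, 1)

def Spec_is_valid_plus (grid : List (List String)) (center_row : Int) (center_col : Int) (length : Int) (out : Bool) : Prop := out = is_valid_plus_alt grid center_row center_col length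
instance (grid : List (List String)) (center_row : Int) (center_col : Int) (length : Int) (out : Bool) : Decidable (Spec_is_valid_plus grid center_row center_col length out) := by unfold Spec_is_valid_plus; infer_instance

-- ===== CLAIM (what is proved, stated in full; the proofs are below) =====
def Claim_equal_is_valid_plus : Prop := ∀ (grid : List (List String)) (center_row : Int) (center_col : Int) (length : Int), Dom_is_valid_plus grid center_row center_col length → Pre_is_valid_plus grid center_row center_col length → Spec_is_valid_plus grid center_row center_col length (is_valid_plus grid center_row center_col length)

-- ===== LEMMAS AND PROOFS =====

-- one iteration of A's loop as a conjunction of its four guarded checks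
def pvStepA (grid : List (List String)) (cr cc rows cols i : Int) : Bool :=
  !(decide (cr - i < 0) || !pvCellA grid (cr - i) cc) &&
  !(decide (cr + i ≥ rows) || !pvCellA grid (cr + i) cc) &&
  !(decide (cc - i < 0) || !pvCellA grid cr (cc - i)) &&
  !(decide (cc + i ≥ cols) || !pvCellA grid cr (cc + i))

lemma pvLoopA_succ (grid : List (List String)) (cr cc rows cols : Int) (n : Nat) (i : Int) :
    pvLoopA grid cr cc rows cols (n + 1) i =
      (pvStepA grid cr cc rows cols i && pvLoopA grid cr cc rows cols n (i + 1)) := by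
  simp only [pvLoopA, pvStepA]
  cases h1 : (decide (cr - i < 0) || !pvCellA grid (cr - i) cc) <;>
  cases h2 : (decide (cr + i ≥ rows) || !pvCellA grid (cr + i) cc) <;>
  cases h3 : (decide (cc - i < 0) || !pvCellA grid cr (cc - i)) <;>
  cases h4 : (decide (cc + i ≥ cols) || !pvCellA grid cr (cc + i)) <;>
  simp [*]

lemma pvLoopA_eq_all (grid : List (List String)) (cr cc rows cols : Int) :
    ∀ (n : Nat) (i : Int), pvLoopA grid cr cc rows cols n i =
      (List.range n).all (fun k => pvStepA grid cr cc rows cols (i + (k : Int))) := by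
  intro n
  induction n with
  | zero => intro i; simp [pvLoopA]
  | succ n ih =>
    intro i
    rw [pvLoopA_succ, List.range_succ_eq_map, List.all_cons, List.all_map, ih (i + 1)]
    simp only [Int.natCast_zero, add_zero]
    congr 1
    congr 1
    funext k
    simp only [Function.comp_apply]
    congr 1
    push_cast
    ring

-- the two cell predicates agree
lemma pvCellA_eq_pvCellB (grid : List (List String)) (r c : Int) :
    pvCellA grid r c = pvCellB grid r c := by
  simp only [pvCellA, pvCellB]
  cases h : PySem.List.pyGet? grid r with
  | none => simp
  | some row =>
    cases h2 : PySem.List.pyGet? row c with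
    | none => simp [h2]
    | some s => simp [h2]

-- extent ≥ n iff the first n cells of the walk are good (and the fuel admits n steps)
lemma pvExtent_ge_iff (grid : List (List String)) (rows cols dr dc : Int) :
    ∀ (n f : Nat) (r c : Int),
      n ≤ pvExtent grid rows cols dr dc f r c ↔
        (n ≤ f ∧ ∀ k : Nat, k < n →
          pvGood grid rows cols (r + (k : Int) * dr) (c + (k : Int) * dc) = true) := by
  intro n
  induction n with
  | zero => intro f r c; simp
  | succ n ih =>
    intro f r c
    cases f with
    | zero => simp [pvExtent]
    | succ m =>
      simp only [pvExtent]
      by_cases hg : pvGood grid rows cols r c = true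
      · rw [if_pos hg]
        constructor
        · intro h
          have h' : n ≤ pvExtent grid rows cols dr dc m (r + dr) (c + dc) := by omega
          obtain ⟨hf, hk⟩ := (ih m (r + dr) (c + dc)).mp h'
          refine ⟨by omega, ?_⟩
          intro k hkn
          cases k with
          | zero => simpa using hg
          | succ j =>
            have := hk j (by omega)
            have e1 : r + dr + (j : Int) * dr = r + ((j + 1 : Nat) : Int) * dr := by
              push_cast; ring
            have e2 : c + dc + (j : Int) * dc = c + ((j + 1 : Nat) : Int) * dc := by
              push_cast; ring
            rw [e1, e2] at this
            exact this
        · rintro ⟨hf, hk⟩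
          have h' : n ≤ pvExtent grid rows cols dr dc m (r + dr) (c + dc) := by
            apply (ih m (r + dr) (c + dc)).mpr
            refine ⟨by omega, ?_⟩
            intro j hj
            have := hk (j + 1) (by omega)
            have e1 : r + ((j + 1 : Nat) : Int) * dr = r + dr + (j : Int) * dr := by
              push_cast; ring
            have e2 : c + ((j + 1 : Nat) : Int) * dc = c + dc + (j : Int) * dc := by
              push_cast; ring
            rw [e1, e2] at this
            exact this
          omega
      · rw [if_neg hg]
        constructor
        · intro h; omega
        · rintro ⟨hf, hk⟩
          exact absurd (by simpa using hk 0 (by omega)) hg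

-- if the start cell is not good every extent is 0
lemma pvExtent_zero_of_bad (grid : List (List String)) (rows cols dr dc : Int)
    (f : Nat) (r c : Int) (h : pvGood grid rows cols r c = false) :
    pvExtent grid rows cols dr dc (f + 1) r c = 0 := by
  simp [pvExtent, h]

-- ===== VERDICT (by name: the statement is the Claim_ definition above) =====
theorem is_valid_plus_spec : Claim_equal_is_valid_plus := by
  intro grid cr cc l _ hpre
  obtain ⟨hne, hcase⟩ := hpre
  unfold Spec_is_valid_plus
  obtain ⟨row0, rest, rfl⟩ : ∃ r t, grid = r :: t := by
    cases grid with
    | nil => exact absurd rfl hne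
    | cons a t => exact ⟨a, t, rfl⟩
  have h0 : PySem.List.pyGet? (row0 :: rest) 0 = some row0 := by
    simp [PySem.List.pyGet?, PySem.List.pyIdx?]
  simp only [is_valid_plus, is_valid_plus_alt, h0]
  by_cases hl : l ≤ 0
  · have : l.toNat = 0 := by omega
    simp [this, pvLoopA, hl]
  · have hlpos : 0 < l := by omega
    rw [if_neg hl]
    set rows : Int := ((row0 :: rest).length : Int) with hrows
    set cols : Int := (row0.length : Int) with hcols
    have hrows0 : 0 < rows := by simp [hrows]
    have hcols0 : 0 ≤ cols := by simp [hcols]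
    -- unfold A's loop to the all-form
    rw [pvLoopA_eq_all]
    by_cases hbad : cr < 0 ∨ cc < 0
    · -- start cell is bad: A fails at i = 0, all four extents are 0
      have hgood0 : pvGood (row0 :: rest) rows cols cr cc = false := by
        simp only [pvGood]
        rcases hbad with h | h
        · simp [show ¬ (0 ≤ cr) by omega]
        · simp [show ¬ (0 ≤ cc) by omega]
      have hB : ∀ dr dc : Int,
          pvExtent (row0 :: rest) rows cols dr dc ((rows + cols).toNat + 1) cr cc = 0 :=
        fun dr dc => pvExtent_zero_of_bad _ _ _ _ _ _ _ _ hgood0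
      have hA : (List.range l.toNat).all
          (fun k => pvStepA (row0 :: rest) cr cc rows cols (0 + (k : Int))) = false := by
        rw [List.all_eq_false]
        refine ⟨0, by simp [List.mem_range]; omega, ?_⟩
        simp only [Int.natCast_zero, add_zero, pvStepA]
        rcases hbad with h | h
        · simp
          intro h1 _ _ _ _ _ _
          exact absurd h1 (by omega)
        · simp
          intro _ _ _ _ h5 _ _
          exact absurd h5 (by omega)
      rw [hA, hB, hB, hB, hB]
      simp
      omega
    · -- main case: 0 ≤ cr < rows, 0 ≤ cc < cols
      rw [not_or] at hbad
      obtain ⟨hcr0, hcc0⟩ := hbad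
      rcases hcase with h | h | h
      · omega
      · omega
      obtain ⟨hrect, hcrlt, hcclo, hcchi⟩ := h
      have hcrlt' : cr < rows := by simpa [hrows] using hcrlt
      have hcchi' : cc < cols := by simpa [hcols, List.headI] using hcchi
      -- per-offset agreement of A's step with the four goodness tests
      have hstep : ∀ k : Nat,
          pvStepA (row0 :: rest) cr cc rows cols (0 + (k : Int)) =
            (pvGood (row0 :: rest) rows cols (cr - (k : Int)) cc &&
             pvGood (row0 :: rest) rows cols (cr + (k : Int)) cc &&
             pvGood (row0 :: rest) rows cols cr (cc - (k : Int)) &&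
             pvGood (row0 :: rest) rows cols cr (cc + (k : Int))) := by
        intro k
        have hk0 : (0 : Int) ≤ (k : Int) := Int.natCast_nonneg k
        have flip : ∀ a : Int, decide (0 ≤ a) = !decide (a < 0) := by
          intro a; simp [← decide_not]
        have flip2 : ∀ a b : Int, decide (a ≥ b) = !decide (a < b) := by
          intro a b; simp [← decide_not]
        have b1 : (cr - (k : Int) < rows) := by omega
        have b2 : (0 : Int) ≤ cr + (k : Int) := by omega
        have b3 : (cc - (k : Int) < cols) := by omega
        have b4 : (0 : Int) ≤ cc + (k : Int) := by omega
        simp only [zero_add, pvStepA, pvGood, pvCellA_eq_pvCellB, Bool.not_or,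
          Bool.not_not, flip, flip2]
        simp [b1, b3, hcrlt', hcchi', Bool.and_assoc,
          show ¬ ((cc : Int) < 0) from by omega, show ¬ ((cr : Int) < 0) from by omega,
          show ¬ (cr + (k : Int) < 0) from by omega,
          show ¬ (cc + (k : Int) < 0) from by omega]
      -- rewrite indices of the four directional walks
      have idx1 : ∀ k : Nat, cr + (k : Int) * (-1) = cr - (k : Int) := fun k => by ring
      have idx2 : ∀ k : Nat, cr + (k : Int) * 1 = cr + (k : Int) := fun k => by ring
      have idx3 : ∀ k : Nat, cc + (k : Int) * (-1) = cc - (k : Int) := fun k => by ring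
      have idx4 : ∀ k : Nat, cc + (k : Int) * 1 = cc + (k : Int) := fun k => by ring
      have idx0 : ∀ k : Nat, (cr : Int) + (k : Int) * 0 = cr := fun k => by ring
      have idx0' : ∀ k : Nat, (cc : Int) + (k : Int) * 0 = cc := fun k => by ring
      rw [Bool.eq_iff_iff]
      simp only [List.all_eq_true, List.mem_range, decide_eq_true_iff,
        le_min_iff]
      constructor
      · -- A true → all goods → each extent ≥ l
        intro hall
        have goods : ∀ k : Nat, k < l.toNat →
            pvGood (row0 :: rest) rows cols (cr - (k : Int)) cc = true ∧
            pvGood (row0 :: rest) rows cols (cr + (k : Int)) cc = true ∧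
            pvGood (row0 :: rest) rows cols cr (cc - (k : Int)) = true ∧
            pvGood (row0 :: rest) rows cols cr (cc + (k : Int)) = true := by
          intro k hk
          have := hall k hk
          rw [hstep k] at this
          simp only [Bool.and_eq_true] at this
          tauto
        have hfle : l.toNat ≤ (rows + cols).toNat + 1 := by
          -- from goodness at the last offset, in the up direction
          have hlast := (goods (l.toNat - 1) (by omega)).1
          simp only [pvGood, Bool.and_eq_true, decide_eq_true_iff] at hlast
          omega
        have ext : ∀ dr dc : Int,
            (∀ k : Nat, k < l.toNat →
              pvGood (row0 :: rest) rows cols (cr + (k : Int) * dr) (cc + (k : Int) * dc) = true) →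
            l ≤ (pvExtent (row0 :: rest) rows cols dr dc ((rows + cols).toNat + 1) cr cc : Int) := by
          intro dr dc hg
          have := (pvExtent_ge_iff (row0 :: rest) rows cols dr dc l.toNat
            ((rows + cols).toNat + 1) cr cc).mpr ⟨hfle, hg⟩
          omega
        refine ⟨⟨?_, ?_⟩, ?_, ?_⟩
        · exact ext (-1) 0 (fun k hk => by rw [idx1 k, idx0' k]; exact (goods k hk).1)
        · exact ext 1 0 (fun k hk => by rw [idx2 k, idx0' k]; exact (goods k hk).2.1)
        · exact ext 0 (-1) (fun k hk => by rw [idx0 k, idx3 k]; exact (goods k hk).2.2.1)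
        · exact ext 0 1 (fun k hk => by rw [idx0 k, idx4 k]; exact (goods k hk).2.2.2)
      · -- each extent ≥ l → all goods → A true
        rintro ⟨⟨e1, e2⟩, e3, e4⟩ k hk
        have g1 := ((pvExtent_ge_iff (row0 :: rest) rows cols (-1) 0 l.toNat
          ((rows + cols).toNat + 1) cr cc).mp (by omega)).2 k hk
        have g2 := ((pvExtent_ge_iff (row0 :: rest) rows cols 1 0 l.toNat
          ((rows + cols).toNat + 1) cr cc).mp (by omega)).2 k hk
        have g3 := ((pvExtent_ge_iff (row0 :: rest) rows cols 0 (-1) l.toNat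
          ((rows + cols).toNat + 1) cr cc).mp (by omega)).2 k hk
        have g4 := ((pvExtent_ge_iff (row0 :: rest) rows cols 0 1 l.toNat
          ((rows + cols).toNat + 1) cr cc).mp (by omega)).2 k hk
        rw [idx1 k, idx0' k] at g1
        rw [idx2 k, idx0' k] at g2
        rw [idx0 k, idx3 k] at g3
        rw [idx0 k, idx4 k] at g4
        rw [hstep k]
        simp [g1, g2, g3, g4]
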